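-- pv_equiv track=rewrite | github.com/milost/kbgen | yago.py | clean_uri
-- ===== SOURCE A (Python) =====
-- def clean_uri(uri: str):
--     dirty_chars = "<>"
--     cleaned = "".join([char for char in uri if char not in dirty_chars])
--     cleaned = cleaned.replace('"', "''")
--     cleaned = cleaned.replace("`", "'")
--     cleaned = cleaned.replace("\\", "U+005C")
--     cleaned = cleaned.replace("^", "U+005E")
--     return cleaned
-- ===== SOURCE B (Python) =====
-- _MAP = {'<': '', '>': '', '"': "''", '`': "'", '\\': 'U+005C', '^': 'U+005E'}
--
--
-- def clean_uri(uri: str):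
--     out = []
--     for ch in uri:
--         out.append(_MAP.get(ch, ch))
--     return "".join(out)
-- ===== Notes on version B (the rewrite author's own statement) =====
-- stated objective: simpler
-- what changed: Replaces the filter-comprehension plus four sequential str.replace passes with one table-driven pass: a mapping dict is looked up per character and the pieces are joined once.
import Mathlib
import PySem

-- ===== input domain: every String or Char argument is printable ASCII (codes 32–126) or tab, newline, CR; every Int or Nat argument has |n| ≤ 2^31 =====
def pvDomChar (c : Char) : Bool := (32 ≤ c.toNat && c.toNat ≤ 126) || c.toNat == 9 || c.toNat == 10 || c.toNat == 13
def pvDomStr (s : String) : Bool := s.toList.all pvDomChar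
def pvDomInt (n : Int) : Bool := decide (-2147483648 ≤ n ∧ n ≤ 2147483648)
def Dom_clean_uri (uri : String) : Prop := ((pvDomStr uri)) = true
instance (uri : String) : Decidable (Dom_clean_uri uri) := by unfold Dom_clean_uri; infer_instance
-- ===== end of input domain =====

-- B replaces A's filter-comprehension plus four sequential replace passes with one
-- table-driven pass (per-character dict lookup, joined once); equivalence proved on Dom.


-- ===== PORT A =====
-- 'char not in dirty_chars' on a 1-character char is exactly list non-membership in "<>".toList
def clean_uri (uri : String) : String :=
  let dirty_chars : List Char := "<>".toList
  let cleaned : String := String.ofList (uri.toList.filter (fun c => !(dirty_chars.contains c)))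
  let cleaned := PySem.Str.replace cleaned "\"" "''"
  let cleaned := PySem.Str.replace cleaned "`" "'"
  let cleaned := PySem.Str.replace cleaned "\\" "U+005C"
  let cleaned := PySem.Str.replace cleaned "^" "U+005E"
  cleaned

-- ===== PORT B =====
def cleanMap : PySem.Dict Char String :=
  PySem.Dict.ofList [('<', ""), ('>', ""), ('"', "''"), ('`', "'"), ('\\', "U+005C"), ('^', "U+005E")]

def clean_uri_alt (uri : String) : String :=
  let out : List String :=
    uri.toList.foldl (fun acc ch => acc ++ [PySem.Dict.getD cleanMap ch (String.ofList [ch])]) []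
  PySem.Str.join "" out

-- ===== PRECONDITION & SPEC =====
def Spec_clean_uri (uri : String) (out : String) : Prop := out = clean_uri_alt uri
instance (uri : String) (out : String) : Decidable (Spec_clean_uri uri out) := by unfold Spec_clean_uri; infer_instance

-- ===== CLAIM (what is proved, stated in full; the proofs are below) =====
def Claim_equal_clean_uri : Prop := ∀ (uri : String), Dom_clean_uri uri → Spec_clean_uri uri (clean_uri uri)

-- ===== LEMMAS AND PROOFS =====

-- the per-character table, as a List Char function
def tbl (c : Char) : List Char :=
  if c = '<' then [] else if c = '>' then []
  else if c = '"' then ['\'', '\'']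
  else if c = '`' then ['\'']
  else if c = '\\' then "U+005C".toList
  else if c = '^' then "U+005E".toList
  else [c]

lemma replace_go_single (o : Char) (new : List Char) :
    ∀ (l : List Char) (fuel : Nat) (acc : List Char), l.length ≤ fuel →
      PySem.Chars.replace.go [o] new fuel l acc
        = acc.reverse ++ l.flatMap (fun c => if c = o then new else [c]) := by
  intro l
  induction l with
  | nil =>
      intro fuel acc _
      cases fuel <;> simp [PySem.Chars.replace.go]
  | cons c t ih =>
      intro fuel acc h
      cases fuel with
      | zero => simp at h
      | succ n =>
        simp only [PySem.Chars.replace.go]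
        by_cases hc : c = o
        · subst hc
          have : List.isPrefixOf [c] (c :: t) = true := by
            simp [List.isPrefixOf]
          rw [if_pos this]
          rw [show List.drop ([c] : List Char).length (c :: t) = t from rfl]
          simp only [List.length_cons] at h
          rw [ih n (new.reverse ++ acc) (by omega)]
          simp
        · have : List.isPrefixOf [o] (c :: t) = true → False := by
            simp [List.isPrefixOf]; intro h'; exact hc h'.symm
          rw [if_neg this]
          rw [ih n (c :: acc) (by simpa using Nat.le_of_succ_le_succ h)]
          simp [hc]

lemma replace_single (l : List Char) (o : Char) (new : List Char) :
    PySem.Chars.replace l [o] new = l.flatMap (fun c => if c = o then new else [c]) := by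
  have hne : ([o] : List Char).isEmpty = false := rfl
  unfold PySem.Chars.replace
  rw [hne]
  rw [if_neg (by simp)]
  exact (replace_go_single o new l l.length [] (le_refl _)).trans (by rw [List.reverse_nil, List.nil_append])

lemma join_empty (parts : List (List Char)) :
    PySem.Chars.join [] parts = parts.flatten := by
  induction parts with
  | nil => simp [PySem.Chars.join, List.intercalate]
  | cons p rest ih =>
    cases rest with
    | nil => simp [PySem.Chars.join, List.intercalate]
    | cons q r =>
      rw [PySem.Chars.join_cons_cons, ih]
      simp

lemma filter_eq_flatMap {A : Type} (p : A → Bool) (l : List A) :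
    l.filter p = l.flatMap (fun c => if p c then [c] else []) := by
  induction l with
  | nil => rfl
  | cons a t ih => by_cases h : p a <;> simp [h, ih]

-- the per-character composition of A's filter and four replaces equals the table
lemma pointwise (c : Char) :
    List.flatMap
      (fun x =>
        List.flatMap
          (fun x =>
            List.flatMap
              (fun x =>
                List.flatMap (fun d => if d = '^' then "U+005E".toList else [d])
                  (if x = '\\' then "U+005C".toList else [x]))
              (if x = '`' then "'".toList else [x]))
          (if x = '"' then "''".toList else [x]))
      (if (!"<>".toList.contains c) = true then [c] else []) = tbl c := by
  by_cases h1 : c = '<'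
  · subst h1; decide
  by_cases h2 : c = '>'
  · subst h2; decide
  by_cases h3 : c = '"'
  · subst h3; decide
  by_cases h4 : c = '`'
  · subst h4; decide
  by_cases h5 : c = '\\'
  · subst h5; decide
  by_cases h6 : c = '^'
  · subst h6; decide
  · have hcon : ("<>".toList.contains c) = false := by
      rw [show "<>".toList = ['<', '>'] from rfl]
      simp [h1, h2]
    rw [hcon]
    simp [tbl, h1, h2, h3, h4, h5, h6]

lemma clean_uri_toList (uri : String) :
    (clean_uri uri).toList = uri.toList.flatMap tbl := by
  simp only [clean_uri, PySem.Str.toList_replace]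
  rw [show ("\"" : String).toList = ['"'] from rfl,
      show ("`" : String).toList = ['`'] from rfl,
      show ("\\" : String).toList = ['\\'] from rfl,
      show ("^" : String).toList = ['^'] from rfl]
  rw [replace_single, replace_single, replace_single, replace_single]
  simp only [String.toList_ofList]
  rw [filter_eq_flatMap]
  simp only [List.flatMap_assoc]
  exact List.flatMap_congr (fun c _ => pointwise c)

lemma dict_getD_tbl (c : Char) :
    (PySem.Dict.getD cleanMap c (String.ofList [c])).toList = tbl c := by
  by_cases h1 : c = '<'
  · subst h1; decide
  by_cases h2 : c = '>'
  · subst h2; decide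
  by_cases h3 : c = '"'
  · subst h3; decide
  by_cases h4 : c = '`'
  · subst h4; decide
  by_cases h5 : c = '\\'
  · subst h5; decide
  by_cases h6 : c = '^'
  · subst h6; decide
  · have hm : cleanMap = PySem.Dict.mk
        [('<', ""), ('>', ""), ('"', "''"), ('`', "'"), ('\\', "U+005C"), ('^', "U+005E")] := by
      decide
    have n1 : '<' ≠ c := fun h => h1 h.symm
    have n2 : '>' ≠ c := fun h => h2 h.symm
    have n3 : '"' ≠ c := fun h => h3 h.symm
    have n4 : '`' ≠ c := fun h => h4 h.symm
    have n5 : '\\' ≠ c := fun h => h5 h.symm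
    have n6 : '^' ≠ c := fun h => h6 h.symm
    rw [hm, PySem.Dict.getD_eq_get?_getD]
    simp only [PySem.Dict.get?_mk_cons]
    simp [n1, n2, n3, n4, n5, n6, tbl, h1, h2, h3, h4, h5, h6,
      show (PySem.Dict.mk ([] : List (Char × String))).get? c = none from rfl]

lemma clean_uri_alt_toList (uri : String) :
    (clean_uri_alt uri).toList = uri.toList.flatMap tbl := by
  simp only [clean_uri_alt, PySem.List.foldl_append_eq_flatMap, List.nil_append,
    PySem.Str.toList_join]
  rw [show ("" : String).toList = [] from rfl, join_empty]
  rw [show uri.toList.flatMap (fun ch => [PySem.Dict.getD cleanMap ch (String.ofList [ch])])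
        = uri.toList.map (fun ch => PySem.Dict.getD cleanMap ch (String.ofList [ch])) from by
    induction uri.toList with
    | nil => rfl
    | cons a t ih => simp [ih]]
  rw [List.map_map, ← List.flatMap_def]
  exact List.flatMap_congr (fun c _ => dict_getD_tbl c)

-- ===== VERDICT (by name: the statement is the Claim_ definition above) =====
theorem clean_uri_spec : Claim_equal_clean_uri := by
  intro uri _
  unfold Spec_clean_uri
  have h := (clean_uri_toList uri).trans (clean_uri_alt_toList uri).symm
  exact String.toList_injective h
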